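-- pv_equiv track=rewrite | github.com/YuYing-Liang/Data-Structures-And-Algorithms | csc190/assignments/chess/chessPlayer.py | isKingAlive
-- ===== SOURCE A (Python) =====
-- def isKingAlive(board):
--     whiteKing = False
--     blackKing = False
--
--     for i in board:
--         if i == 15:
--             whiteKing = True
--         elif i == 25:
--             blackKing = True
--
--     return whiteKing and blackKing
-- ===== SOURCE B (Python) =====
-- def isKingAlive(board):
--     need = {15, 25}
--     i = 0
--     while need and i < len(board):
--         need = need - {board[i]}
--         i += 1
--     return not need
-- ===== Notes on version B (the rewrite author's own statement) =====
-- stated objective: alternative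
-- what changed: Replaces the full-pass loop maintaining two boolean flags with an early-terminating scan that carries the shrinking set of still-needed king values and succeeds as soon as that set becomes empty.
import Mathlib
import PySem

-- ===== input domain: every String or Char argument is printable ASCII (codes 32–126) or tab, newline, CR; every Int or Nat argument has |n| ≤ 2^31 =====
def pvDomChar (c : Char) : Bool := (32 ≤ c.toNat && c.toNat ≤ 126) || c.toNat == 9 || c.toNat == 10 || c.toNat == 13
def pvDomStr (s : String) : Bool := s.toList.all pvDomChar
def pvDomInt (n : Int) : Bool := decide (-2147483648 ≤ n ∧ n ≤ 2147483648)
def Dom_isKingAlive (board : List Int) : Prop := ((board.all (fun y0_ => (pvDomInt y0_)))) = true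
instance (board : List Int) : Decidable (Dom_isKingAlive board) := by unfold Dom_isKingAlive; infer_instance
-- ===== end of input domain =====

-- B replaces A's full-pass two-flag loop with an early-terminating search over the shrinking set of still-needed king values (alternative decomposition, same cost).

-- ===== PORT A =====
-- A: one pass over the whole board updating two flags, then their conjunction.
def isKingAlive (board : List Int) : Bool :=
  let st := board.foldl
    (fun (st : Bool × Bool) i =>
      if i == 15 then (true, st.2)
      else if i == 25 then (st.1, true)
      else st)
    (false, false)
  st.1 && st.2

-- ===== PORT B =====
-- B's while loop `while need and i < len(board)` as structural recursion over the
-- remaining board (the suffix from index i), carrying the set `need` of still-needed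
-- values; `need - {board[i]}` is set difference, removing the current element.
def seekB (rest : List Int) (need : PySem.Set Int) : Bool :=
  if need = [] then true
  else match rest with
    | [] => false
    | x :: xs => seekB xs (need.filter (fun v => !(v == x)))

def isKingAlive_alt (board : List Int) : Bool :=
  seekB board (PySem.Set.ofList [15, 25])

-- ===== PRECONDITION & SPEC =====
def Spec_isKingAlive (board : List Int) (out : Bool) : Prop := out = isKingAlive_alt board
instance (board : List Int) (out : Bool) : Decidable (Spec_isKingAlive board out) := by unfold Spec_isKingAlive; infer_instance

-- ===== CLAIM (what is proved, stated in full; the proofs are below) =====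
def Claim_equal_isKingAlive : Prop := ∀ (board : List Int), Dom_isKingAlive board → Spec_isKingAlive board (isKingAlive board)

-- ===== LEMMAS AND PROOFS =====
-- A's loop invariant: folding from state (w, b) ORs in membership of 15 and 25.
theorem isKingAlive_fold_inv (board : List Int) (w b : Bool) :
    board.foldl
      (fun (st : Bool × Bool) i =>
        if i == 15 then (true, st.2)
        else if i == 25 then (st.1, true)
        else st)
      (w, b)
    = (w || board.contains 15, b || board.contains 25) := by
  induction board generalizing w b with
  | nil => simp
  | cons x xs ih =>
    simp only [List.foldl_cons]
    by_cases h15 : (x == 15) = true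
    · rw [if_pos h15, ih]
      have hx : x = 15 := by simpa using h15
      simp [hx]
    · rw [if_neg h15]
      by_cases h25 : (x == 25) = true
      · rw [if_pos h25, ih]
        have hx : x = 25 := by simpa using h25
        simp [hx]
      · rw [if_neg h25, ih]
        have n15 : x ≠ 15 := by simpa using h15
        have n25 : x ≠ 25 := by simpa using h25
        simp [Ne.symm n15, Ne.symm n25]

-- Filtering out x from the needed set matches prepending x to the searched rest.
theorem all_cons_filter (x : Int) (xs need : List Int) :
    (need.filter (fun v => !(v == x))).all (fun v => xs.contains v)
    = need.all (fun v => (x :: xs).contains v) := by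
  rw [Bool.eq_iff_iff]
  simp only [List.all_eq_true, List.mem_filter, Bool.not_eq_true',
    beq_eq_false_iff_ne, ne_eq, List.contains_eq_mem, decide_eq_true_eq]
  constructor
  · intro h v hv
    by_cases hx : v = x
    · exact List.mem_cons.mpr (Or.inl hx)
    · exact List.mem_cons.mpr (Or.inr (h v ⟨hv, hx⟩))
  · intro h v hv
    rcases List.mem_cons.mp (h v hv.1) with h1 | h1
    · exact absurd h1 hv.2
    · exact h1

-- Characterisation of B's recursive search: it succeeds iff every still-needed value occurs in the rest.
theorem seekB_eq_all (rest : List Int) (need : List Int) :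
    seekB rest need = need.all (fun v => rest.contains v) := by
  induction rest generalizing need with
  | nil =>
    unfold seekB
    cases need with
    | nil => simp
    | cons v vs => simp
  | cons x xs ih =>
    unfold seekB
    by_cases hn : need = []
    · simp [hn]
    · rw [if_neg hn]
      show seekB xs (need.filter (fun v => !(v == x))) = _
      rw [ih, all_cons_filter]

-- ===== VERDICT (by name: the statement is the Claim_ definition above) =====
theorem isKingAlive_spec : Claim_equal_isKingAlive := by
  intro board _
  unfold Spec_isKingAlive isKingAlive isKingAlive_alt
  rw [isKingAlive_fold_inv]
  have h : PySem.Set.ofList ([15, 25] : List Int) = [15, 25] := by decide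
  rw [h, seekB_eq_all]
  simp
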